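-- pv_equiv track=rewrite | github.com/Basilio0505/CS313E-Elements-of-Software-Design | Triangle.py | divide_conquer_helper
-- ===== SOURCE A (Python) =====
-- def divide_conquer_helper(grid, row, idx, sum):
--     if row >= len(grid):
--         return [sum]
--     else:
--         if row == len(grid) - 1:
--             return divide_conquer_helper(grid, row+1,idx,sum+ int(grid[row][idx]))
--         else:
--             return divide_conquer_helper(grid, row+1,idx,sum+ int(grid[row][idx]))+ \
--                      divide_conquer_helper(grid,row+1,idx+1, sum + int(grid[row][idx]))
-- ===== SOURCE B (Python) =====
-- def divide_conquer_helper(grid, row, idx, sum):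
--     n = len(grid)
--     results = []
--     stack = [(row, idx, sum)]
--     while stack:
--         r, j, acc = stack.pop()
--         if r >= n:
--             results.append(acc)
--         elif r == n - 1:
--             stack.append((r + 1, j, acc + int(grid[r][j])))
--         else:
--             v = acc + int(grid[r][j])
--             stack.append((r + 1, j + 1, v))
--             stack.append((r + 1, j, v))
--     return results
-- ===== Notes on version B (the rewrite author's own statement) =====
-- stated objective: alternative
-- what changed: Replaces the binary recursion with an iterative loop over an explicit stack of (row, idx, acc) frames (right child pushed before left), appending leaf sums to a result list.
import Mathlib
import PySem

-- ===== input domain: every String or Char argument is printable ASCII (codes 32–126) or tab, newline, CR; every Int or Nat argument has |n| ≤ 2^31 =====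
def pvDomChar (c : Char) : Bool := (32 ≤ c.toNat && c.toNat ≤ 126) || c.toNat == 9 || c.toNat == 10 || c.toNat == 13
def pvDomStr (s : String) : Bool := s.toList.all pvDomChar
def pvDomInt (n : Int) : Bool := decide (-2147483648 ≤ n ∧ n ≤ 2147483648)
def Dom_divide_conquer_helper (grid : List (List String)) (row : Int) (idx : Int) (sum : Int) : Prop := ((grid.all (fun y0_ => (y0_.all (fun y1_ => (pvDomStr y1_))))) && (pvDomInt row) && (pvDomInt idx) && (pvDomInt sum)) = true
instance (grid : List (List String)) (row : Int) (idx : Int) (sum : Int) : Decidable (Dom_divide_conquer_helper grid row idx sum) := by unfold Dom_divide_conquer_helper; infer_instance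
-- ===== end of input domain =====

-- B replaces A's binary recursion by an iterative loop over an explicit stack of frames; same values, same order.

-- shared cell accessor: int(grid[r][j]) as an Option; Python raises (IndexError/ValueError) exactly when this is none.
def pvCell? (grid : List (List String)) (r j : Int) : Option Int :=
  ((PySem.List.pyGet? grid r).bind (fun rl => PySem.List.pyGet? rl j)).bind
    (fun s => PySem.Int.ofStr? s)

-- ===== PORT A =====
def divide_conquer_helper (grid : List (List String)) (row : Int) (idx : Int) (sum : Int) : List Int :=
  if row ≥ (grid.length : Int) then [sum]
  else
    match pvCell? grid row idx with
    | none => []   -- Python raises IndexError/ValueError here; unreachable inside Pre_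
    | some c =>
      if row = (grid.length : Int) - 1 then
        divide_conquer_helper grid (row + 1) idx (sum + c)
      else
        divide_conquer_helper grid (row + 1) idx (sum + c) ++
          divide_conquer_helper grid (row + 1) (idx + 1) (sum + c)
termination_by ((grid.length : Int) - row).toNat
decreasing_by all_goals omega

-- ===== PORT B =====
-- the stack's TOP is the list head (Python's list end); Python pushes right child then left, so here
-- we cons the left frame in front of the right frame: the left child is popped first, as in Source B.
def dchLoop (grid : List (List String)) (n : Int) (stack : List (Int × Int × Int))
    (results : List Int) : List Int :=
  match stack with
  | [] => results
  | (r, j, acc) :: rest =>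
    if r ≥ n then dchLoop grid n rest (results ++ [acc])
    else
      match pvCell? grid r j with
      | none => results   -- Python raises IndexError/ValueError here; unreachable inside Pre_
      | some c =>
        if r = n - 1 then dchLoop grid n ((r + 1, j, acc + c) :: rest) results
        else
          let v := acc + c
          dchLoop grid n ((r + 1, j, v) :: (r + 1, j + 1, v) :: rest) results
termination_by (stack.map (fun f => 3 ^ ((n - f.1).toNat))).sum
decreasing_by
  · have : 0 < 3 ^ ((n - r).toNat) := Nat.pow_pos (by omega)
    simp
  · simp
    have h1 : (n - (r + 1)).toNat = 0 := by omega
    have h2 : (n - r).toNat = 1 := by omega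
    rw [h1, h2]
    norm_num
  · simp
    have h1 : (n - r).toNat = (n - (r + 1)).toNat + 1 := by omega
    rw [h1, pow_succ]
    have : 0 < 3 ^ ((n - (r + 1)).toNat) := Nat.pow_pos (by omega)
    omega

def divide_conquer_helper_alt (grid : List (List String)) (row : Int) (idx : Int) (sum : Int) : List Int :=
  dchLoop grid (grid.length : Int) [(row, idx, sum)] []

-- ===== PRECONDITION & SPEC =====
-- every triangle cell reachable from (r, j) exists (Python negative-index rules) and parses as an int;
-- the max/min clamps only bound the search (they change nothing when -len ≤ r, which Pre_ guarantees)
-- so that deciding Pre_ stays cheap even for a huge negative r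
def pvSafe (grid : List (List String)) (r j : Int) : Prop :=
  ∀ r' ∈ PySem.List.pyRange (max r (-(grid.length : Int))) (grid.length : Int) 1,
    ∀ j' ∈ PySem.List.pyRange j (j + min (r' - r) (2 * (grid.length : Int)) + 1) 1,
      (pvCell? grid r' j').isSome

-- Pre_ holds exactly when Python A returns normally: either row is past the grid, or grid[row] exists
-- (Python negative-index rules) and every triangle cell the recursion touches exists and parses as an
-- int; otherwise A raises IndexError/ValueError.
def Pre_divide_conquer_helper (grid : List (List String)) (row : Int) (idx : Int) (sum : Int) : Prop :=
  (row ≥ (grid.length : Int) ∨ -(grid.length : Int) ≤ row) ∧ pvSafe grid row idx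
instance (grid : List (List String)) (row : Int) (idx : Int) (sum : Int) : Decidable (Pre_divide_conquer_helper grid row idx sum) := by unfold Pre_divide_conquer_helper pvSafe; infer_instance

def pvWitness_divide_conquer_helper : List (List String) × Int × Int × Int :=
  ([["1"], ["2", "3"], ["4", "5", "6"]], 0, 0, 0)

def Spec_divide_conquer_helper (grid : List (List String)) (row : Int) (idx : Int) (sum : Int) (out : List Int) : Prop := out = divide_conquer_helper_alt grid row idx sum
instance (grid : List (List String)) (row : Int) (idx : Int) (sum : Int) (out : List Int) : Decidable (Spec_divide_conquer_helper grid row idx sum out) := by unfold Spec_divide_conquer_helper; infer_instance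

-- ===== CLAIM (what is proved, stated in full; the proofs are below) =====
def Claim_equal_divide_conquer_helper : Prop := ∀ (grid : List (List String)) (row : Int) (idx : Int) (sum : Int), Dom_divide_conquer_helper grid row idx sum → Pre_divide_conquer_helper grid row idx sum → Spec_divide_conquer_helper grid row idx sum (divide_conquer_helper grid row idx sum)

-- ===== LEMMAS AND PROOFS =====
-- safety propagates to the cell access and to both children
theorem pvSafe_cell (grid : List (List String)) (r j : Int) (h : ¬ r ≥ (grid.length : Int))
    (hr : -(grid.length : Int) ≤ r) (hS : pvSafe grid r j) : (pvCell? grid r j).isSome := by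
  apply hS r _ j
  · rw [PySem.List.mem_pyRange_one]; omega
  · rw [PySem.List.mem_pyRange_one]; omega

theorem pvSafe_left (grid : List (List String)) (r j : Int) (hr : -(grid.length : Int) ≤ r)
    (hS : pvSafe grid r j) : pvSafe grid (r + 1) j := by
  intro r' hr' j' hj'
  rw [PySem.List.mem_pyRange_one] at hr' hj'
  apply hS r' _ j'
  · rw [PySem.List.mem_pyRange_one]; omega
  · rw [PySem.List.mem_pyRange_one]; omega

theorem pvSafe_right (grid : List (List String)) (r j : Int) (hr : -(grid.length : Int) ≤ r)
    (hS : pvSafe grid r j) : pvSafe grid (r + 1) (j + 1) := by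
  intro r' hr' j' hj'
  rw [PySem.List.mem_pyRange_one] at hr' hj'
  apply hS r' _ j'
  · rw [PySem.List.mem_pyRange_one]; omega
  · rw [PySem.List.mem_pyRange_one]; omega

-- one-step unfolding lemmas for A's recursion
theorem dch_base (grid : List (List String)) (row idx sum : Int) (h : row ≥ (grid.length : Int)) :
    divide_conquer_helper grid row idx sum = [sum] := by
  rw [divide_conquer_helper.eq_def]; simp [h]

theorem dch_last (grid : List (List String)) (idx sum c : Int)
    (h : ¬ ((grid.length : Int) - 1 ≥ (grid.length : Int)))
    (hc : pvCell? grid ((grid.length : Int) - 1) idx = some c) :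
    divide_conquer_helper grid ((grid.length : Int) - 1) idx sum =
      divide_conquer_helper grid ((grid.length : Int) - 1 + 1) idx (sum + c) := by
  rw [divide_conquer_helper.eq_def]; simp [h, hc]

theorem dch_step (grid : List (List String)) (row idx sum c : Int) (h : ¬ row ≥ (grid.length : Int))
    (h2 : ¬ row = (grid.length : Int) - 1) (hc : pvCell? grid row idx = some c) :
    divide_conquer_helper grid row idx sum =
      divide_conquer_helper grid (row + 1) idx (sum + c) ++
        divide_conquer_helper grid (row + 1) (idx + 1) (sum + c) := by
  rw [divide_conquer_helper.eq_def]; simp [h, h2, hc]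

-- loop invariant: with every stack frame safe, the stack machine emits, in order, the concatenation
-- of A's results for the frames on the stack (top first), after the results already produced.
theorem dchLoop_eq (grid : List (List String)) (stack : List (Int × Int × Int)) (results : List Int)
    (hS : ∀ f ∈ stack, -(grid.length : Int) ≤ f.1 ∧ pvSafe grid f.1 f.2.1) :
    dchLoop grid (grid.length : Int) stack results =
      results ++ stack.flatMap (fun f => divide_conquer_helper grid f.1 f.2.1 f.2.2) := by
  fun_induction dchLoop grid (grid.length : Int) stack results with
  | case1 => simp
  | case2 results r j acc rest h ih =>
    rw [ih (fun f hf => hS f (List.mem_cons_of_mem _ hf))]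
    simp only [List.flatMap_cons, dch_base grid r j acc h]
    simp
  | case3 results r j acc rest h hc =>
    obtain ⟨hr, hsafe⟩ := hS (r, j, acc) List.mem_cons_self
    exact absurd (pvSafe_cell grid r j h hr hsafe) (by simp [hc])
  | case4 results j acc rest c h hc ih =>
    obtain ⟨hr0, hsafe0⟩ := hS _ List.mem_cons_self
    have hS' : ∀ f ∈ ((grid.length : Int) - 1 + 1, j, acc + c) :: rest,
        -(grid.length : Int) ≤ f.1 ∧ pvSafe grid f.1 f.2.1 := by
      intro f hf
      rcases List.mem_cons.mp hf with rfl | hf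
      · exact ⟨by omega, pvSafe_left grid ((grid.length : Int) - 1) j hr0 hsafe0⟩
      · exact hS f (List.mem_cons_of_mem _ hf)
    rw [ih hS']
    simp only [List.flatMap_cons, dch_last grid j acc c h hc]
  | case5 results r j acc rest h c hc h2 v ih =>
    obtain ⟨hr0, hsafe0⟩ := hS (r, j, acc) List.mem_cons_self
    have hS' : ∀ f ∈ (r + 1, j, v) :: (r + 1, j + 1, v) :: rest,
        -(grid.length : Int) ≤ f.1 ∧ pvSafe grid f.1 f.2.1 := by
      intro f hf
      rcases List.mem_cons.mp hf with rfl | hf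
      · exact ⟨by omega, pvSafe_left grid r j hr0 hsafe0⟩
      · rcases List.mem_cons.mp hf with rfl | hf
        · exact ⟨by omega, pvSafe_right grid r j hr0 hsafe0⟩
        · exact hS f (List.mem_cons_of_mem _ hf)
    rw [ih hS']
    simp only [List.flatMap_cons, dch_step grid r j acc c h h2 hc, v]
    simp

-- ===== VERDICT (by name: the statement is the Claim_ definition above) =====
theorem divide_conquer_helper_spec : Claim_equal_divide_conquer_helper := by
  intro grid row idx sum _ hpre
  unfold Spec_divide_conquer_helper divide_conquer_helper_alt
  rw [dchLoop_eq grid _ _ (by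
    intro f hf
    rcases List.mem_cons.mp hf with rfl | hf
    · exact ⟨by rcases hpre.1 with h | h <;> omega, hpre.2⟩
    · simp at hf)]
  simp
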